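-- pv_equiv track=rewrite | github.com/a-yasui/atysPy | reverse_source.py | in_line_show
-- ===== SOURCE A (Python) =====
-- def in_line_show (words, ptr=0, nest = 1):
-- 	nest_word = "".join([' ' for i in range(0, nest * 4)])
-- 	buff      = nest_word
--
-- 	while ptr <= len(words):
-- 		if not 0 <= ptr < len(words):
-- 			return (buff, ptr)
-- 		word = words[ptr]
-- 		ptr += 1
--
-- 		if word == ';':
-- 			buff += ";\n" + nest_word
-- 		elif word == '\n':
-- 			buff += "\n"
-- 		elif word == '{':
-- 			buff += "\n" + nest_word + "{\n"
-- 			_buff, ptr = in_line_show(words, ptr, nest + 1)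
-- 			buff += _buff + nest_word
-- 		elif word == '}':
-- 			nest_word = "".join([' ' for i in range(0, (nest - 1) * 4)])
-- 			buff += "\n" + nest_word + "}\n"
-- 			return (buff, ptr)
-- 		else:
-- 			buff += word
-- 	# end while
-- 	return (buff, ptr)
-- ===== SOURCE B (Python) =====
-- def in_line_show(words, ptr=0, nest=1):
--     frames = [(nest, ' ' * (nest * 4))]  # stack of (level, buffer); top is last
--     while 0 <= ptr < len(words):
--         word = words[ptr]
--         ptr += 1
--         level, buff = frames[-1]
--         if word == ';':
--             frames[-1] = (level, buff + ";\n" + ' ' * (level * 4))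
--         elif word == '\n':
--             frames[-1] = (level, buff + "\n")
--         elif word == '{':
--             frames[-1] = (level, buff + "\n" + ' ' * (level * 4) + "{\n")
--             frames.append((level + 1, ' ' * ((level + 1) * 4)))
--         elif word == '}':
--             closed = buff + "\n" + ' ' * ((level - 1) * 4) + "}\n"
--             frames.pop()
--             if not frames:
--                 return (closed, ptr)
--             plevel, pbuff = frames[-1]
--             frames[-1] = (plevel, pbuff + closed + ' ' * (plevel * 4))
--         else:
--             frames[-1] = (level, buff + word)
--     # cursor left range: unwind remaining frames bottom-up
--     while len(frames) > 1:
--         _, buff = frames.pop()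
--         plevel, pbuff = frames[-1]
--         frames[-1] = (plevel, pbuff + buff + ' ' * (plevel * 4))
--     return (frames[0][1], ptr)
-- ===== Notes on version B (the rewrite author's own statement) =====
-- stated objective: alternative
-- what changed: Replaces A's recursion (a nested call per '{' whose result is spliced into the caller's buffer) with a single iterative pass over the tokens maintaining an explicit stack of (nest level, buffer) frames, merging a frame into its parent on '}' and unwinding the stack when the cursor leaves range.
import Mathlib
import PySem

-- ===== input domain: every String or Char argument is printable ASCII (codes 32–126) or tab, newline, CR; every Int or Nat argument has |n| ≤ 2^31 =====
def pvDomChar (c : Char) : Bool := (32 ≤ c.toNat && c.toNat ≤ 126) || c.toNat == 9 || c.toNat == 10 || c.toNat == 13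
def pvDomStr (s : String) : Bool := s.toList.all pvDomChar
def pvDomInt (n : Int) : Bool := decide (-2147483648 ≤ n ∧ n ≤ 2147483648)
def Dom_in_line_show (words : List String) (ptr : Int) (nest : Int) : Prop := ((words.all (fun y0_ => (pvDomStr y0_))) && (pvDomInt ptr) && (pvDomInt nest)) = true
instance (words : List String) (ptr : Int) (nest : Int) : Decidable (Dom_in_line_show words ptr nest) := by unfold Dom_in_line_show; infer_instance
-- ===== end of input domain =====

-- ===== PORT A =====
-- B replaces A's recursion with one iterative pass over an explicit stack of (level, buffer) frames; same cost, return value proved equal.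
-- nest_word = "".join([' ' for i in range(0, n * 4)])
def nwA (n : Int) : String :=
  PySem.Str.join "" ((PySem.List.pyRange 0 (n * 4) 1).map (fun _ => " "))

-- A's loop body, fuel-threaded: the Nat in the result is the remaining fuel (one unit per token
-- consumed), so the nested call resumes the caller's loop with the fuel it left over.
def loopA (words : List String) (f : Nat) (ptr : Int) (nest : Int) (nw : String) (buff : String) :
    {r : String × Int × Nat // r.2.2 ≤ f} :=
  match f with
  | 0 => ⟨(buff, ptr, 0), by simp⟩
  | g + 1 =>
    if 0 ≤ ptr ∧ ptr < (words.length : Int) then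
      let word := (PySem.List.pyGet? words ptr).getD ""
      let p1 := ptr + 1
      if word = ";" then
        let r := loopA words g p1 nest nw (buff ++ ";\n" ++ nw)
        ⟨r.1, le_trans r.2 (Nat.le_succ g)⟩
      else if word = "\n" then
        let r := loopA words g p1 nest nw (buff ++ "\n")
        ⟨r.1, le_trans r.2 (Nat.le_succ g)⟩
      else if word = "{" then
        match loopA words g p1 (nest + 1) (nwA (nest + 1)) (nwA (nest + 1)) with
        | ⟨(b2, p2, f2), h2⟩ =>
          let r := loopA words f2 p2 nest nw (buff ++ "\n" ++ nw ++ "{\n" ++ b2 ++ nw)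
          ⟨r.1, le_trans r.2 (le_trans h2 (Nat.le_succ g))⟩
      else if word = "}" then
        ⟨(buff ++ "\n" ++ nwA (nest - 1) ++ "}\n", p1, g), by simp⟩
      else
        let r := loopA words g p1 nest nw (buff ++ word)
        ⟨r.1, le_trans r.2 (Nat.le_succ g)⟩
    else ⟨(buff, ptr, g + 1), le_refl (g + 1)⟩
termination_by f
decreasing_by all_goals first | omega | simp_all

def in_line_show (words : List String) (ptr : Int) (nest : Int) : String × Int :=
  let r := loopA words (words.length + 1) ptr nest (nwA nest) (nwA nest)
  (r.1.1, r.1.2.1)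

-- ===== PORT B =====
-- ' ' * (n * 4)
def nwB (n : Int) : String := String.ofList (PySem.List.pyRepeat [' '] (n * 4))

-- second while loop of Source B: merge popped frames bottom-up
def unwindB (buff : String) : List (Int × String) → String
  | [] => buff
  | (pl, pb) :: rest => unwindB (pb ++ buff ++ nwB pl) rest

def unwindAll : List (Int × String) → String
  | [] => ""
  | (_, b) :: rest => unwindB b rest

-- first while loop of Source B; fuel counts loop iterations (one per token consumed)
def loopB (words : List String) : Nat → Int → List (Int × String) → String × Int
  | 0, ptr, frames => (unwindAll frames, ptr)
  | f + 1, ptr, frames =>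
    if 0 ≤ ptr ∧ ptr < (words.length : Int) then
      let word := (PySem.List.pyGet? words ptr).getD ""
      let p1 := ptr + 1
      match frames with
      | [] => (unwindAll [], p1)  -- unreachable: the stack is never empty inside the loop
      | (level, buff) :: rest =>
        if word = ";" then loopB words f p1 ((level, buff ++ ";\n" ++ nwB level) :: rest)
        else if word = "\n" then loopB words f p1 ((level, buff ++ "\n") :: rest)
        else if word = "{" then
          loopB words f p1 ((level + 1, nwB (level + 1)) :: (level, buff ++ "\n" ++ nwB level ++ "{\n") :: rest)
        else if word = "}" then
          let closed := buff ++ "\n" ++ nwB (level - 1) ++ "}\n"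
          match rest with
          | [] => (closed, p1)
          | (pl, pb) :: rr => loopB words f p1 ((pl, pb ++ closed ++ nwB pl) :: rr)
        else loopB words f p1 ((level, buff ++ word) :: rest)
    else (unwindAll frames, ptr)

def in_line_show_alt (words : List String) (ptr : Int) (nest : Int) : String × Int :=
  loopB words (words.length + 1) ptr [(nest, nwB nest)]

-- ===== PRECONDITION & SPEC =====
def Spec_in_line_show (words : List String) (ptr : Int) (nest : Int) (out : String × Int) : Prop := out = in_line_show_alt words ptr nest
instance (words : List String) (ptr : Int) (nest : Int) (out : String × Int) : Decidable (Spec_in_line_show words ptr nest out) := by unfold Spec_in_line_show; infer_instance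

-- ===== CLAIM (what is proved, stated in full; the proofs are below) =====
def Claim_equal_in_line_show : Prop := ∀ (words : List String) (ptr : Int) (nest : Int), Dom_in_line_show words ptr nest → Spec_in_line_show words ptr nest (in_line_show words ptr nest)

-- ===== LEMMAS AND PROOFS =====

theorem str_ext {s t : String} (h : s.toList = t.toList) : s = t := by
  have := congrArg String.ofList h; simpa using this

theorem joinRepChar : ∀ k : Nat, PySem.Chars.join [] (List.replicate k [' ']) = List.replicate k ' ' := by
  intro k
  induction k with
  | zero => simp [PySem.Chars.join_nil]
  | succ m ih =>
    cases m with
    | zero => simp [PySem.Chars.join_singleton]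
    | succ m =>
      have h1 : List.replicate (m + 1 + 1) ([' '] : List Char) = [' '] :: [' '] :: List.replicate m [' '] := by
        simp [List.replicate_succ]
      rw [h1, PySem.Chars.join_cons_cons]
      have h2 : ([' '] : List Char) :: List.replicate m [' '] = List.replicate (m + 1) [' '] := by
        simp [List.replicate_succ]
      rw [h2, ih]
      simp [List.replicate_succ]

theorem nwA_eq_nwB (n : Int) : nwA n = nwB n := by
  apply str_ext
  unfold nwA nwB
  rw [PySem.List.pyRepeat_singleton, PySem.List.pyRange_one]
  rw [PySem.Str.toList_join]
  have h : List.map String.toList (List.map (fun _ => " ") (List.map (fun k : Nat => 0 + (k : Int)) (List.range (n * 4 - 0).toNat))) = List.replicate ((n * 4).toNat) [' '] := by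
    rw [List.map_const', List.map_replicate]
    simp
  have he : "".toList = ([] : List Char) := by decide
  rw [h, he, joinRepChar]
  simp

-- what loopB does after the top frame's run ends with result r (buffer, ptr, remaining fuel)
def contB (words : List String) (r : String × Int × Nat) : List (Int × String) → String × Int
  | [] => (r.1, r.2.1)
  | (pl, pb) :: rr => loopB words r.2.2 r.2.1 ((pl, pb ++ r.1 ++ nwB pl) :: rr)

theorem loopB_out (words : List String) (f : Nat) (ptr : Int) (frames : List (Int × String))
    (h : ¬(0 ≤ ptr ∧ ptr < (words.length : Int))) :
    loopB words f ptr frames = (unwindAll frames, ptr) := by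
  cases f with
  | zero => rfl
  | succ f => simp [loopB, h]

theorem main_lemma (words : List String) :
    ∀ f ptr nest buff rest,
      loopB words f ptr ((nest, buff) :: rest) =
        contB words (loopA words f ptr nest (nwB nest) buff).1 rest := by
  intro f
  induction f using Nat.strong_induction_on with
  | _ f IH =>
    match f with
    | 0 =>
      intro ptr nest buff rest
      rw [loopA.eq_def]
      dsimp only
      cases rest with
      | nil => simp [loopB, contB, unwindAll, unwindB]
      | cons hd tl =>
        obtain ⟨pl, pb⟩ := hd
        simp [loopB, contB, unwindAll, unwindB]
    | f + 1 =>
      intro ptr nest buff rest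
      by_cases hr : 0 ≤ ptr ∧ ptr < (words.length : Int)
      · conv_lhs => rw [loopB]
        rw [loopA.eq_def]
        dsimp only
        rw [if_pos hr, if_pos hr]
        try dsimp only
        rw [nwA_eq_nwB, nwA_eq_nwB]
        by_cases h1 : (PySem.List.pyGet? words ptr).getD "" = ";"
        · rw [if_pos h1, if_pos h1]
          exact IH f (by omega) (ptr + 1) nest (buff ++ ";\n" ++ nwB nest) rest
        · rw [if_neg h1, if_neg h1]
          by_cases h2 : (PySem.List.pyGet? words ptr).getD "" = "\n"
          · rw [if_pos h2, if_pos h2]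
            exact IH f (by omega) (ptr + 1) nest (buff ++ "\n") rest
          · rw [if_neg h2, if_neg h2]
            by_cases h3 : (PySem.List.pyGet? words ptr).getD "" = "{"
            · rw [if_pos h3, if_pos h3]
              rcases hA : loopA words f (ptr + 1) (nest + 1) (nwB (nest + 1)) (nwB (nest + 1)) with ⟨⟨b2, p2, f2⟩, hf2⟩
              dsimp only
              rw [IH f (by omega) (ptr + 1) (nest + 1) (nwB (nest + 1)) ((nest, buff ++ "\n" ++ nwB nest ++ "{\n") :: rest), hA]
              dsimp only [contB]
              have hle : f2 ≤ f := by simpa using hf2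
              rw [IH f2 (by omega) p2 nest (buff ++ "\n" ++ nwB nest ++ "{\n" ++ b2 ++ nwB nest) rest]
              rfl
            · rw [if_neg h3, if_neg h3]
              by_cases h4 : (PySem.List.pyGet? words ptr).getD "" = "}"
              · rw [if_pos h4, if_pos h4]
                cases rest with
                | nil => rfl
                | cons hd tl => obtain ⟨pl, pb⟩ := hd; rfl
              · rw [if_neg h4, if_neg h4]
                exact IH f (by omega) (ptr + 1) nest (buff ++ (PySem.List.pyGet? words ptr).getD "") rest
      · rw [loopB_out words _ _ _ hr]
        rw [loopA.eq_def]
        dsimp only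
        rw [if_neg hr]
        cases rest with
        | nil => simp [contB, unwindAll, unwindB]
        | cons hd tl =>
          obtain ⟨pl, pb⟩ := hd
          dsimp only [contB]
          rw [loopB_out words _ _ _ hr]
          simp [unwindAll, unwindB]

theorem ports_agree (words : List String) (ptr nest : Int) :
    in_line_show words ptr nest = in_line_show_alt words ptr nest := by
  unfold in_line_show in_line_show_alt
  rw [nwA_eq_nwB, main_lemma]
  rfl

-- ===== VERDICT (by name: the statement is the Claim_ definition above) =====
theorem in_line_show_spec : Claim_equal_in_line_show := by
  intro words ptr nest _
  unfold Spec_in_line_show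
  exact ports_agree words ptr nest
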